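-- pv_equiv track=rewrite | github.com/hayashidalex/qa-tool-log-analyzer | metrics.py | calculate_review_counts
-- ===== SOURCE A (Python) =====
-- def is_reviewed(log):
--     if not log.get('is_independent_question'):
--         return False
--     if log['is_independent_question'] == 'No':
--         return True
--     return bool(
--         log.get('response_review') and
--         log.get('query_review') and
--         log.get('urls_review')
--     )
--
-- def cnt(reviewed_logs, field, val):
--     return sum(1 for l in reviewed_logs if l.get(field) == val)
--
-- def calculate_review_counts(logs):
--     total = len(logs)
--     reviewed_logs = [l for l in logs if is_reviewed(l)]
--     not_reviewed_logs = [l for l in logs if not is_reviewed(l)]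
--     indep_yes = sum(1 for l in reviewed_logs if l['is_independent_question'] == 'Yes')
--     indep_no = sum(1 for l in reviewed_logs if l['is_independent_question'] == 'No')
--
--     return {
--         'total': total,
--         'reviewed': len(reviewed_logs),
--         'not_reviewed': len(not_reviewed_logs),
--         'indep_yes': indep_yes,
--         'indep_no': indep_no,
--         'resp_excellent': cnt(reviewed_logs, 'response_review', 'Excellent'),
--         'resp_good': cnt(reviewed_logs, 'response_review', 'Good'),
--         'resp_satisfactory': cnt(reviewed_logs, 'response_review', 'Satisfactory'),
--         'resp_unsatisfactory': cnt(reviewed_logs, 'response_review', 'Unsatisfactory'),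
--         'resp_not_sure': cnt(reviewed_logs, 'response_review', 'Not Sure'),
--         'query_relevant': cnt(reviewed_logs, 'query_review', 'Relevant'),
--         'query_irrelevant': cnt(reviewed_logs, 'query_review', 'Irrelevant'),
--         'query_violation': cnt(reviewed_logs, 'query_review', 'Violation'),
--         'query_badly_formed': cnt(reviewed_logs, 'query_review', 'Badly Formed'),
--         'query_not_sure': cnt(reviewed_logs, 'query_review', 'Not Sure'),
--         'urls_good': cnt(reviewed_logs, 'urls_review', 'Good'),
--         'urls_acceptable': cnt(reviewed_logs, 'urls_review', 'Acceptable'),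
--         'urls_bad': cnt(reviewed_logs, 'urls_review', 'Bad'),
--         'urls_idk': cnt(reviewed_logs, 'urls_review', "I Don't Know"),
--     }
-- ===== SOURCE B (Python) =====
-- def calculate_review_counts(logs):
--     reviewed = iy = ino = 0
--     re_ = rg = rs = ru = rn = 0
--     qr = qi = qv = qb = qn = 0
--     ug = ua = ub = ui = 0
--     for log in logs:
--         v = log.get('is_independent_question')
--         if not v:
--             continue
--         if v != 'No' and not (log.get('response_review') and
--                               log.get('query_review') and
--                               log.get('urls_review')):
--             continue
--         reviewed += 1
--         iy += v == 'Yes'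
--         ino += v == 'No'
--         r = log.get('response_review')
--         re_ += r == 'Excellent'
--         rg += r == 'Good'
--         rs += r == 'Satisfactory'
--         ru += r == 'Unsatisfactory'
--         rn += r == 'Not Sure'
--         q = log.get('query_review')
--         qr += q == 'Relevant'
--         qi += q == 'Irrelevant'
--         qv += q == 'Violation'
--         qb += q == 'Badly Formed'
--         qn += q == 'Not Sure'
--         u = log.get('urls_review')
--         ug += u == 'Good'
--         ua += u == 'Acceptable'
--         ub += u == 'Bad'
--         ui += u == "I Don't Know"
--     return {
--         'total': len(logs),
--         'reviewed': reviewed,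
--         'not_reviewed': len(logs) - reviewed,
--         'indep_yes': iy,
--         'indep_no': ino,
--         'resp_excellent': re_,
--         'resp_good': rg,
--         'resp_satisfactory': rs,
--         'resp_unsatisfactory': ru,
--         'resp_not_sure': rn,
--         'query_relevant': qr,
--         'query_irrelevant': qi,
--         'query_violation': qv,
--         'query_badly_formed': qb,
--         'query_not_sure': qn,
--         'urls_good': ug,
--         'urls_acceptable': ua,
--         'urls_bad': ub,
--         'urls_idk': ui,
--     }
-- ===== Notes on version B (the rewrite author's own statement) =====
-- stated objective: alternative
-- what changed: Replaces A's two filter passes plus 17 separate counting scans over the reviewed sublist with one single pass over logs that evaluates the review predicate once per log and bumps integer accumulators, deriving not_reviewed as total - reviewed.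
import Mathlib
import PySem

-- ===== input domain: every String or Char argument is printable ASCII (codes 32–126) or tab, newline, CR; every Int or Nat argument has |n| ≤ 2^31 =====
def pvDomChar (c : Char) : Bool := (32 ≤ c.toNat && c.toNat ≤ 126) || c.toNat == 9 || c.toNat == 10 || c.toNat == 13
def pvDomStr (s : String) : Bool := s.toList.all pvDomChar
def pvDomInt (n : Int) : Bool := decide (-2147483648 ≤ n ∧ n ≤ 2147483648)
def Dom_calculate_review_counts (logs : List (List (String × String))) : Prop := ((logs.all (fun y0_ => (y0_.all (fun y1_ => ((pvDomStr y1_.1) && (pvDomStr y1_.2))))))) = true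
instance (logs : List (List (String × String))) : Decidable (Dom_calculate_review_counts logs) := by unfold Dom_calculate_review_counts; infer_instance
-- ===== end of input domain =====

-- B replaces A's ~19 list passes by one single pass with integer accumulators (objective: alternative decomposition).

-- ===== PORT A =====
-- log.get(k): first-match association-list lookup (exact for dicts, whose keys are unique)
def pvGet (log : List (String × String)) (k : String) : Option String :=
  (log.find? (fun p => p.1 == k)).map (·.2)

-- Python truthiness of `log.get(k)`: None and '' are falsy
def pvTruthy (o : Option String) : Bool :=
  match o with
  | none => false
  | some s => s ≠ ""

def is_reviewed (log : List (String × String)) : Bool :=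
  if !pvTruthy (pvGet log "is_independent_question") then false
  -- log['is_independent_question']: key is present here (guard above), so lookup = pvGet
  else if pvGet log "is_independent_question" == some "No" then true
  else pvTruthy (pvGet log "response_review") && pvTruthy (pvGet log "query_review") &&
       pvTruthy (pvGet log "urls_review")

-- sum(1 for l in reviewed_logs if l.get(field) == val)
def cnt (reviewed_logs : List (List (String × String))) (field val : String) : Int :=
  (reviewed_logs.countP (fun l => pvGet l field == some val) : Int)

def calculate_review_counts (logs : List (List (String × String))) : List (String × Int) :=
  let total : Int := logs.length
  let reviewed_logs := logs.filter is_reviewed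
  let not_reviewed_logs := logs.filter (fun l => !is_reviewed l)
  let indep_yes : Int := (reviewed_logs.countP (fun l => pvGet l "is_independent_question" == some "Yes") : Int)
  let indep_no : Int := (reviewed_logs.countP (fun l => pvGet l "is_independent_question" == some "No") : Int)
  [("total", total),
   ("reviewed", (reviewed_logs.length : Int)),
   ("not_reviewed", (not_reviewed_logs.length : Int)),
   ("indep_yes", indep_yes),
   ("indep_no", indep_no),
   ("resp_excellent", cnt reviewed_logs "response_review" "Excellent"),
   ("resp_good", cnt reviewed_logs "response_review" "Good"),
   ("resp_satisfactory", cnt reviewed_logs "response_review" "Satisfactory"),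
   ("resp_unsatisfactory", cnt reviewed_logs "response_review" "Unsatisfactory"),
   ("resp_not_sure", cnt reviewed_logs "response_review" "Not Sure"),
   ("query_relevant", cnt reviewed_logs "query_review" "Relevant"),
   ("query_irrelevant", cnt reviewed_logs "query_review" "Irrelevant"),
   ("query_violation", cnt reviewed_logs "query_review" "Violation"),
   ("query_badly_formed", cnt reviewed_logs "query_review" "Badly Formed"),
   ("query_not_sure", cnt reviewed_logs "query_review" "Not Sure"),
   ("urls_good", cnt reviewed_logs "urls_review" "Good"),
   ("urls_acceptable", cnt reviewed_logs "urls_review" "Acceptable"),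
   ("urls_bad", cnt reviewed_logs "urls_review" "Bad"),
   ("urls_idk", cnt reviewed_logs "urls_review" "I Don't Know")]

-- ===== PORT B =====
-- the 16 integer accumulators of Source B's loop
structure RC where
  reviewed : Int
  iy : Int
  ino : Int
  re_ : Int
  rg : Int
  rs : Int
  ru : Int
  rn : Int
  qr : Int
  qi : Int
  qv : Int
  qb : Int
  qn : Int
  ug : Int
  ua : Int
  ub : Int
  ui : Int
deriving Repr, DecidableEq

-- Python's implicit bool → int coercion in `x += (a == b)`
def b2i (b : Bool) : Int := if b then 1 else 0

def rcStep (st : RC) (log : List (String × String)) : RC :=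
  let v := pvGet log "is_independent_question"
  if !pvTruthy v then st
  else if v != some "No" && !(pvTruthy (pvGet log "response_review") &&
                              pvTruthy (pvGet log "query_review") &&
                              pvTruthy (pvGet log "urls_review")) then st
  else
    let r := pvGet log "response_review"
    let q := pvGet log "query_review"
    let u := pvGet log "urls_review"
    { reviewed := st.reviewed + 1
      iy := st.iy + b2i (v == some "Yes")
      ino := st.ino + b2i (v == some "No")
      re_ := st.re_ + b2i (r == some "Excellent")
      rg := st.rg + b2i (r == some "Good")
      rs := st.rs + b2i (r == some "Satisfactory")
      ru := st.ru + b2i (r == some "Unsatisfactory")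
      rn := st.rn + b2i (r == some "Not Sure")
      qr := st.qr + b2i (q == some "Relevant")
      qi := st.qi + b2i (q == some "Irrelevant")
      qv := st.qv + b2i (q == some "Violation")
      qb := st.qb + b2i (q == some "Badly Formed")
      qn := st.qn + b2i (q == some "Not Sure")
      ug := st.ug + b2i (u == some "Good")
      ua := st.ua + b2i (u == some "Acceptable")
      ub := st.ub + b2i (u == some "Bad")
      ui := st.ui + b2i (u == some "I Don't Know") }

def calculate_review_counts_alt (logs : List (List (String × String))) : List (String × Int) :=
  let st := logs.foldl rcStep ⟨0,0,0,0,0,0,0,0,0,0,0,0,0,0,0,0,0⟩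
  [("total", (logs.length : Int)),
   ("reviewed", st.reviewed),
   ("not_reviewed", (logs.length : Int) - st.reviewed),
   ("indep_yes", st.iy),
   ("indep_no", st.ino),
   ("resp_excellent", st.re_),
   ("resp_good", st.rg),
   ("resp_satisfactory", st.rs),
   ("resp_unsatisfactory", st.ru),
   ("resp_not_sure", st.rn),
   ("query_relevant", st.qr),
   ("query_irrelevant", st.qi),
   ("query_violation", st.qv),
   ("query_badly_formed", st.qb),
   ("query_not_sure", st.qn),
   ("urls_good", st.ug),
   ("urls_acceptable", st.ua),
   ("urls_bad", st.ub),
   ("urls_idk", st.ui)]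

-- ===== PRECONDITION & SPEC =====
def Spec_calculate_review_counts (logs : List (List (String × String))) (out : List (String × Int)) : Prop := out = calculate_review_counts_alt logs
instance (logs : List (List (String × String))) (out : List (String × Int)) : Decidable (Spec_calculate_review_counts logs out) := by unfold Spec_calculate_review_counts; infer_instance

-- ===== CLAIM (what is proved, stated in full; the proofs are below) =====
def Claim_equal_calculate_review_counts : Prop := ∀ (logs : List (List (String × String))), Dom_calculate_review_counts logs → Spec_calculate_review_counts logs (calculate_review_counts logs)

-- ===== LEMMAS AND PROOFS =====

-- counts a log iff it is reviewed AND the given field-lookup predicate holds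
def rcp (field val : String) (l : List (String × String)) : Bool :=
  is_reviewed l && (pvGet l field == some val)

theorem rcStep_eq (st : RC) (l : List (String × String)) :
    rcStep st l =
      { reviewed := st.reviewed + b2i (is_reviewed l)
        iy := st.iy + b2i (rcp "is_independent_question" "Yes" l)
        ino := st.ino + b2i (rcp "is_independent_question" "No" l)
        re_ := st.re_ + b2i (rcp "response_review" "Excellent" l)
        rg := st.rg + b2i (rcp "response_review" "Good" l)
        rs := st.rs + b2i (rcp "response_review" "Satisfactory" l)
        ru := st.ru + b2i (rcp "response_review" "Unsatisfactory" l)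
        rn := st.rn + b2i (rcp "response_review" "Not Sure" l)
        qr := st.qr + b2i (rcp "query_review" "Relevant" l)
        qi := st.qi + b2i (rcp "query_review" "Irrelevant" l)
        qv := st.qv + b2i (rcp "query_review" "Violation" l)
        qb := st.qb + b2i (rcp "query_review" "Badly Formed" l)
        qn := st.qn + b2i (rcp "query_review" "Not Sure" l)
        ug := st.ug + b2i (rcp "urls_review" "Good" l)
        ua := st.ua + b2i (rcp "urls_review" "Acceptable" l)
        ub := st.ub + b2i (rcp "urls_review" "Bad" l)
        ui := st.ui + b2i (rcp "urls_review" "I Don't Know" l) } := by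
  unfold rcStep rcp is_reviewed b2i
  cases st
  cases hv : pvTruthy (pvGet l "is_independent_question") <;>
    cases hno : pvGet l "is_independent_question" == some "No" <;>
    cases ht : (pvTruthy (pvGet l "response_review") && pvTruthy (pvGet l "query_review") &&
                pvTruthy (pvGet l "urls_review")) <;>
    simp_all

theorem rc_fold_eq (logs : List (List (String × String))) (st : RC) :
    logs.foldl rcStep st =
      { reviewed := st.reviewed + (logs.countP is_reviewed : Int)
        iy := st.iy + (logs.countP (rcp "is_independent_question" "Yes") : Int)
        ino := st.ino + (logs.countP (rcp "is_independent_question" "No") : Int)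
        re_ := st.re_ + (logs.countP (rcp "response_review" "Excellent") : Int)
        rg := st.rg + (logs.countP (rcp "response_review" "Good") : Int)
        rs := st.rs + (logs.countP (rcp "response_review" "Satisfactory") : Int)
        ru := st.ru + (logs.countP (rcp "response_review" "Unsatisfactory") : Int)
        rn := st.rn + (logs.countP (rcp "response_review" "Not Sure") : Int)
        qr := st.qr + (logs.countP (rcp "query_review" "Relevant") : Int)
        qi := st.qi + (logs.countP (rcp "query_review" "Irrelevant") : Int)
        qv := st.qv + (logs.countP (rcp "query_review" "Violation") : Int)
        qb := st.qb + (logs.countP (rcp "query_review" "Badly Formed") : Int)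
        qn := st.qn + (logs.countP (rcp "query_review" "Not Sure") : Int)
        ug := st.ug + (logs.countP (rcp "urls_review" "Good") : Int)
        ua := st.ua + (logs.countP (rcp "urls_review" "Acceptable") : Int)
        ub := st.ub + (logs.countP (rcp "urls_review" "Bad") : Int)
        ui := st.ui + (logs.countP (rcp "urls_review" "I Don't Know") : Int) } := by
  induction logs generalizing st with
  | nil => cases st; simp
  | cons l ls ih =>
    rw [List.foldl_cons, ih, rcStep_eq]
    simp only [RC.mk.injEq, List.countP_cons, b2i]
    refine ⟨?_, ?_, ?_, ?_, ?_, ?_, ?_, ?_, ?_, ?_, ?_, ?_, ?_, ?_, ?_, ?_, ?_⟩ <;>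
      · split <;> simp_all <;> omega

theorem countP_filter_rcp (logs : List (List (String × String))) (field val : String) :
    (logs.filter is_reviewed).countP (fun l => pvGet l field == some val) =
      logs.countP (rcp field val) := by
  rw [List.countP_filter]
  exact List.countP_congr (fun l _ => by simp [rcp, Bool.and_comm])

theorem countP_not_rev (logs : List (List (String × String))) :
    ((logs.countP (fun l => !is_reviewed l)) : Int) =
      (logs.length : Int) - (logs.countP is_reviewed : Int) := by
  induction logs with
  | nil => simp
  | cons l ls ih =>
    simp only [List.countP_cons, List.length_cons]
    cases h : is_reviewed l <;> simp_all <;> push_cast <;> omega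

-- ===== VERDICT (by name: the statement is the Claim_ definition above) =====
theorem calculate_review_counts_spec : Claim_equal_calculate_review_counts := by
  intro logs _
  unfold Spec_calculate_review_counts calculate_review_counts calculate_review_counts_alt cnt
  rw [rc_fold_eq]
  simp only [← List.countP_eq_length_filter, countP_filter_rcp, countP_not_rev,
    List.cons.injEq, Prod.mk.injEq]
  norm_num [← List.countP_eq_length_filter, countP_not_rev]
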